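-- pv_equiv track=rewrite | github.com/hamzalimouri/HackerRank-Python-Problem-Solving | Problem Solving (Basic)/toys.py | toys
-- ===== SOURCE A (Python) =====
-- def toys(w):
--     res = 0
--     w.sort()
--     i = 0
--     while i < len(w):
--         j = i + 1
--         while j < len(w):
--             if w[j] > w[i] + 4:
--                 break
--             j += 1
--         i = j
--         res += 1
--     return res
-- ===== SOURCE B (Python) =====
-- def toys(w):
--     # No sorting: repeatedly extract the minimum's whole group by filtering.
--     # (Unlike A, this does not sort w in place; return values agree.)
--     res = 0
--     rest = w
--     while rest:
--         limit = min(rest) + 4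
--         rest = [x for x in rest if x > limit]
--         res += 1
--     return res
-- ===== Notes on version B (the rewrite author's own statement) =====
-- stated objective: alternative
-- what changed: Drops the sort entirely: instead of sorting and walking adjacent indices, B repeatedly takes min(rest) and filters out every element within +4 of it, counting one container per peel.
import Mathlib
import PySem

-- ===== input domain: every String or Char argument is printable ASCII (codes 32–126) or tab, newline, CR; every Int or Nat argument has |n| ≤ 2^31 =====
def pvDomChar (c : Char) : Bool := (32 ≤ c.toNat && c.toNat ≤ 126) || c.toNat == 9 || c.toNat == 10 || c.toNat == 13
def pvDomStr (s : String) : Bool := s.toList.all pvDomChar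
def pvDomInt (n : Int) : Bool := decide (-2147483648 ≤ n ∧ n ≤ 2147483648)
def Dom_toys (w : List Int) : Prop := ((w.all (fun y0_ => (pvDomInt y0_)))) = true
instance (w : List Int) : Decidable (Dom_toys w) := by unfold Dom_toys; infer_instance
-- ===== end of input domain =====

-- B drops the sort entirely: it repeatedly takes min(rest) and filters out every element
-- within +4 of it, counting one container per peel (alternative algorithm, no sorting).
-- A sorts its argument in place and B does not: the equivalence proved is about the return value.


-- ===== PORT A =====
-- inner while loop: j starts at i+1, stops at first j with w[j] > w[i] + 4 (or len(w))
def toysInner (s : List Int) (base : Int) (j : Nat) : Nat :=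
  if _h : j < s.length then
    if s.getD j 0 > base + 4 then j else toysInner s base (j + 1)
  else j
termination_by s.length - j

-- characterisation of the inner loop, cited by the outer loop's termination proof
theorem toysInner_eq (s : List Int) (base : Int) (j : Nat) :
    toysInner s base j = j + ((s.drop j).takeWhile (fun y => decide (y ≤ base + 4))).length := by
  induction hn : s.length - j using Nat.strong_induction_on generalizing j with
  | _ n ih =>
    unfold toysInner
    by_cases h : j < s.length
    · have hdrop : s.drop j = s[j] :: s.drop (j + 1) := List.drop_eq_getElem_cons h
      have hgd : s.getD j 0 = s[j] := List.getD_eq_getElem s 0 h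
      rw [hdrop, hgd, List.takeWhile_cons]
      by_cases hc : s[j] > base + 4
      · have hp : decide (s[j] ≤ base + 4) = false := by simp; omega
        simp [h, hc, hp]
      · have hp : decide (s[j] ≤ base + 4) = true := by simp; omega
        have hrec := ih (s.length - (j + 1)) (by omega) (j + 1) rfl
        simp [h, hc, hp, hrec]
        omega
    · simp [h, List.drop_eq_nil_of_le (by omega : s.length ≤ j)]

theorem toysInner_ge (s : List Int) (base : Int) (j : Nat) : j ≤ toysInner s base j := by
  rw [toysInner_eq]; omega

-- outer while loop over i, counting groups
def toysOuter (s : List Int) (i : Nat) (res : Int) : Int :=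
  if _h : i < s.length then
    toysOuter s (toysInner s (s.getD i 0) (i + 1)) (res + 1)
  else res
termination_by s.length - i
decreasing_by
  have := toysInner_ge s (s.getD i 0) (i + 1)
  omega

def toys (w : List Int) : Int :=
  toysOuter (PySem.List.sorted w (fun x => x) false) 0 0

-- ===== PORT B =====
-- B's while loop: state = (rest, res); min(rest) via PySem.List.min?
def toysAltGo (rest : List Int) (res : Int) : Int :=
  match rest with
  | [] => res
  | x :: xs =>
    let limit := (PySem.List.min? (x :: xs) (fun v => v)).getD 0 + 4
    toysAltGo ((x :: xs).filter (fun v => decide (limit < v))) (res + 1)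
termination_by rest.length
decreasing_by
  simp only [PySem.List.min?_id_cons, Option.getD_some]
  refine List.length_filter_lt_length_iff_exists.mpr ⟨xs.foldl min x, ?_, by simp⟩
  rcases PySem.List.foldl_min_mem xs x with h | h
  · rw [h]; exact List.mem_cons_self
  · exact List.mem_cons_of_mem x h

def toys_alt (w : List Int) : Int := toysAltGo w 0

-- ===== PRECONDITION & SPEC =====
def Spec_toys (w : List Int) (out : Int) : Prop := out = toys_alt w
instance (w : List Int) (out : Int) : Decidable (Spec_toys w out) := by unfold Spec_toys; infer_instance

-- ===== CLAIM (what is proved, stated in full; the proofs are below) =====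
def Claim_equal_toys : Prop := ∀ (w : List Int), Dom_toys w → Spec_toys w (toys w)

-- ===== LEMMAS AND PROOFS =====

-- common reference function: number of greedy groups of a sorted list
def pvGroups : List Int → Int
  | [] => 0
  | x :: xs => 1 + pvGroups (xs.dropWhile (fun y => decide (y ≤ x + 4)))
termination_by l => l.length
decreasing_by
  have := List.length_dropWhile_le (fun y => decide (y ≤ x + 4)) xs
  simpa using Nat.lt_succ_of_le this

theorem pvGroups_cons (x : Int) (xs : List Int) :
    pvGroups (x :: xs) = 1 + pvGroups (xs.dropWhile (fun y => decide (y ≤ x + 4))) := by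
  rw [pvGroups]

theorem drop_length_takeWhile {α : Type} (p : α → Bool) (l : List α) :
    l.drop (l.takeWhile p).length = l.dropWhile p := by
  induction l with
  | nil => rfl
  | cons x xs ih =>
    by_cases h : p x <;> simp [h, ih]

theorem toysOuter_eq (s : List Int) (i : Nat) (res : Int) :
    toysOuter s i res = res + pvGroups (s.drop i) := by
  induction hn : s.length - i using Nat.strong_induction_on generalizing i res with
  | _ n ih =>
    unfold toysOuter
    by_cases h : i < s.length
    · have hdrop : s.drop i = s[i] :: s.drop (i + 1) := List.drop_eq_getElem_cons h
      have hgd : s.getD i 0 = s[i] := List.getD_eq_getElem s 0 h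
      have hin := toysInner_eq s (s.getD i 0) (i + 1)
      set t := ((s.drop (i + 1)).takeWhile (fun y => decide (y ≤ s.getD i 0 + 4))).length with ht
      have hnext : toysInner s (s.getD i 0) (i + 1) = i + 1 + t := hin
      have hrec := ih (s.length - (i + 1 + t)) (by omega) (i + 1 + t) (res + 1) rfl
      have hdd : s.drop (i + 1 + t) = (s.drop (i + 1)).dropWhile (fun y => decide (y ≤ s.getD i 0 + 4)) := by
        rw [← List.drop_drop, ht, drop_length_takeWhile]
      simp only [h, dif_pos, hnext, hrec, hdd]
      rw [hdrop, pvGroups_cons, hgd]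
      omega
    · have : s.drop i = [] := List.drop_eq_nil_of_le (by omega)
      simp only [h, this]
      simp [pvGroups]

-- on a sorted list, dropping the ≤-prefix is the same as keeping the >-elements
theorem sorted_dropWhile_eq_filter (c : Int) (s : List Int) (hs : s.Pairwise (· ≤ ·)) :
    s.dropWhile (fun y => decide (y ≤ c)) = s.filter (fun y => decide (c < y)) := by
  induction s with
  | nil => rfl
  | cons x xs ih =>
    rcases List.pairwise_cons.mp hs with ⟨hx, hxs⟩
    by_cases h : x ≤ c
    · have h' : ¬ c < x := by omega
      simp [h, h', ih hxs]
    · have h' : c < x := by omega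
      have : xs.filter (fun y => decide (c < y)) = xs := by
        apply List.filter_eq_self.mpr
        intro y hy
        have := hx y hy
        simp; omega
      simp [h, h', this]

-- one peel step: removing the min's +4 group drops exactly the first greedy group of the sorted list
theorem peel_step (l : List Int) (m : Int) (hmem : m ∈ l) (hmin : ∀ y ∈ l, m ≤ y) :
    pvGroups (PySem.List.sorted l (fun x => x) false)
      = 1 + pvGroups (PySem.List.sorted (l.filter (fun v => decide (m + 4 < v))) (fun x => x) false) := by
  have h : l ≠ [] := List.ne_nil_of_mem hmem
  have hsne : PySem.List.sorted l (fun x => x) false ≠ [] := by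
    intro hc; exact h ((PySem.List.sorted_eq_nil_iff l (fun x => x) false).mp hc)
  obtain ⟨hd, tl, hcons⟩ := List.exists_cons_of_ne_nil hsne
  have hperm : (PySem.List.sorted l (fun x => x) false).Perm l :=
    PySem.List.sorted_perm l (fun x => x) false
  have hpw : (PySem.List.sorted l (fun x => x) false).Pairwise (· ≤ ·) := by
    have := PySem.List.sorted_pairwise (xs := l) (key := fun x => x)
    simpa using this
  have hhd : hd = m := by
    have h1 : m ≤ hd := hmin hd (hperm.mem_iff.mp (by rw [hcons]; exact List.mem_cons_self))
    have h2 : hd ≤ m := by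
      have := PySem.List.key_head_sorted_le (xs := l) (key := fun x => x) hcons m hmem
      simpa using this
    omega
  have hfil : PySem.List.sorted (l.filter (fun v => decide (m + 4 < v))) (fun x => x) false
      = (PySem.List.sorted l (fun x => x) false).filter (fun v => decide (m + 4 < v)) := by
    apply PySem.List.sorted_id_eq_of_perm_of_pairwise
    · exact hperm.filter _
    · exact hpw.filter _
  rw [hfil, hcons, pvGroups_cons, hhd]
  have htl : tl.Pairwise (· ≤ ·) := (List.pairwise_cons.mp (hcons ▸ hpw)).2
  rw [sorted_dropWhile_eq_filter (m + 4) tl htl]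
  have hfc : (m :: tl).filter (fun v => decide (m + 4 < v)) = tl.filter (fun v => decide (m + 4 < v)) := by
    rw [List.filter_cons]
    have hno : ¬ m + 4 < m := by omega
    simp [hno]
  rw [hfc]

-- the peel recursion equals the greedy group count of the sorted list
theorem toysAltGo_eq (l : List Int) (res : Int) :
    toysAltGo l res = res + pvGroups (PySem.List.sorted l (fun x => x) false) := by
  induction hn : l.length using Nat.strong_induction_on generalizing l res with
  | _ n ih =>
    cases l with
    | nil =>
      rw [toysAltGo]
      have hs : PySem.List.sorted ([] : List Int) (fun x => x) false = [] := rfl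
      rw [hs, pvGroups]
      omega
    | cons x xs =>
      rw [toysAltGo]
      cases hm : PySem.List.min? (x :: xs) (fun v => v) with
      | none =>
        exact absurd ((PySem.List.min?_eq_none_iff (x :: xs) (fun v => v)).mp hm)
          (List.cons_ne_nil x xs)
      | some m =>
        simp only [Option.getD_some]
        have hmem : m ∈ x :: xs := PySem.List.min?_mem hm
        have hmin : ∀ y ∈ x :: xs, m ≤ y := by
          have := PySem.List.min?_isMin hm
          simpa using this
        have hlt : ((x :: xs).filter (fun v => decide (m + 4 < v))).length < n := by
          rw [← hn]
          refine List.length_filter_lt_length_iff_exists.mpr ⟨m, hmem, by simp⟩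
        have hrec := ih _ hlt ((x :: xs).filter (fun v => decide (m + 4 < v))) (res + 1) rfl
        refine hrec.trans ?_
        rw [peel_step (x :: xs) m hmem hmin]
        omega

-- ===== VERDICT (by name: the statement is the Claim_ definition above) =====
theorem toys_spec : Claim_equal_toys := by
  intro w _
  unfold Spec_toys toys toys_alt
  rw [toysOuter_eq, toysAltGo_eq]
  simp
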